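-- pv_equiv track=rewrite | github.com/AidanZhong/HandGestureRecog | scripts/t4.py | f_eff
-- ===== SOURCE A (Python) =====
-- def f_eff(X):
--     # The first function f which has a time complexity of O(n^3),
--     # The idea of pre_sum list came into my mind, but this time I will design a pre_xor list
--     # Since a ^ b ^ b = a, so define pre_xor[i] = x[0] ^ x[1] ^ ... ^ x[i]
--     # xor_list(X[l:r]) = pre_xor[r] ^ pre_xor[l-1], if l > 0, or pre_xor[r] which is a O(1) calculation
--     # Then we do the O(n) and_list, we got the f in O(n^2)
--     if not X:
--         return 0
--     pre_xor_list = [X[0]]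
--     # init the ans as all bit 1, which is ~0 in python
--     ans = ~0
--
--     # construct the pre_xor_list
--     for i in range(1, len(X)):
--         pre_xor_list.append(pre_xor_list[-1] ^ X[i])
--     # traverse the start and end
--     for start in range(len(X)):
--         for end in range(start, len(X)):
--             if start == 0:
--                 ans &= pre_xor_list[end]
--             else:
--                 ans &= (pre_xor_list[end] ^ X[start - 1])
--     return ans
-- ===== SOURCE B (Python) =====
-- def f_eff(X):
--     # Closed form: with two or more elements, every bit is cleared by some subarray XOR
--     # (for each bit, one of the first element, the second element, or their XOR has it clear),
--     # so the AND over all subarray XORs is 0; a single element is its own only subarray;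
--     # the empty input gives 0.
--     if len(X) == 1:
--         return X[0]
--     return 0
-- ===== Notes on version B (the rewrite author's own statement) =====
-- stated objective: faster
-- what changed: Replaced the O(n^2) double loop over prefix-XOR combinations by the closed form: the singleton list returns its only element and every other list returns 0, justified by a per-bit pigeonhole argument.
import Mathlib
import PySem

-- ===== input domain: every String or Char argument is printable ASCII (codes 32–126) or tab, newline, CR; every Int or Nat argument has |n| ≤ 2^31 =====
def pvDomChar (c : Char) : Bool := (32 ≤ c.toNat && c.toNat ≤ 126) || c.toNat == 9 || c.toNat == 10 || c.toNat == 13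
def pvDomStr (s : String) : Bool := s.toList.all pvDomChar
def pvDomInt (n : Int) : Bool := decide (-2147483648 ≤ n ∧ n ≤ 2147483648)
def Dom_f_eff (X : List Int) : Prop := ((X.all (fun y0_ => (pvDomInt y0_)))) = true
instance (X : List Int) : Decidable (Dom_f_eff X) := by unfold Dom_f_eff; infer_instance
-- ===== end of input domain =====

-- B replaces A's O(n^2) double loop by the closed form (0 unless the list is a singleton,
-- then its element), justified by a per-bit argument; a timing run measures the speed-up.

-- ===== PORT A =====
-- helper = A's local variable pre_xor_list, built by the same loop
def pvPreXor (X : List Int) : List Int :=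
  (PySem.List.pyRange 1 (X.length : Int) 1).foldl
    (fun acc i => acc ++ [PySem.Int.bxor (PySem.List.pyGetD acc (-1) 0) (PySem.List.pyGetD X i 0)])
    [PySem.List.pyGetD X 0 0]

def f_eff (X : List Int) : Int :=
  if X = [] then 0
  else
    (PySem.List.pyRange 0 (X.length : Int) 1).foldl
      (fun ans start =>
        (PySem.List.pyRange start (X.length : Int) 1).foldl
          (fun ans e =>
            if start = 0 then PySem.Int.band ans (PySem.List.pyGetD (pvPreXor X) e 0)
            else PySem.Int.band ans
              (PySem.Int.bxor (PySem.List.pyGetD (pvPreXor X) e 0) (PySem.List.pyGetD X (start - 1) 0)))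
          ans)
      (Int.not 0)

-- ===== PORT B =====
def f_eff_alt (X : List Int) : Int :=
  if X.length = 1 then PySem.List.pyGetD X 0 0 else 0

-- ===== PRECONDITION & SPEC =====
def Spec_f_eff (X : List Int) (out : Int) : Prop := out = f_eff_alt X
instance (X : List Int) (out : Int) : Decidable (Spec_f_eff X out) := by unfold Spec_f_eff; infer_instance

-- ===== CLAIM (what is proved, stated in full; the proofs are below) =====
def Claim_equal_f_eff : Prop := ∀ (X : List Int), Dom_f_eff X → Spec_f_eff X (f_eff X)

-- ===== LEMMAS AND PROOFS =====

-- Nat bit arithmetic: (m ||| n) + (m &&& n) = m + n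
lemma pv_or_add_and : ∀ (m n : Nat), (m ||| n) + (m &&& n) = m + n := by
  intro m
  induction m using Nat.strong_induction_on with
  | _ m ih =>
    intro n
    rcases Nat.eq_zero_or_pos m with hm | hm
    · subst hm; simp
    · have h1 : (m ||| n) = 2 * ((m / 2) ||| (n / 2)) + (m ||| n) % 2 := by
        rw [← Nat.or_div_two]; omega
      have h2 : (m &&& n) = 2 * ((m / 2) &&& (n / 2)) + (m &&& n) % 2 := by
        rw [← Nat.and_div_two]; omega
      have ih' := ih (m / 2) (by omega) (n / 2)
      have ho := Nat.testBit_or m n 0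
      have ha := Nat.testBit_and m n 0
      simp only [Nat.testBit_zero, ← Bool.decide_or, ← Bool.decide_and] at ho ha
      rw [decide_eq_decide] at ho ha
      omega

lemma pv_ldiff_or (m n : Nat) : (m.ldiff n ||| (m &&& n)) = m := by
  apply Nat.eq_of_testBit_eq
  intro i
  simp only [Nat.testBit_or, Nat.testBit_ldiff, Nat.testBit_and]
  cases m.testBit i <;> cases n.testBit i <;> rfl

lemma pv_ldiff_and (m n : Nat) : (m.ldiff n &&& (m &&& n)) = 0 := by
  apply Nat.zero_of_testBit_eq_false
  intro i
  simp only [Nat.testBit_and, Nat.testBit_ldiff]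
  cases m.testBit i <;> cases n.testBit i <;> rfl

lemma pv_sub_and (m n : Nat) : m - (m &&& n) = m.ldiff n := by
  have h := pv_or_add_and (m.ldiff n) (m &&& n)
  rw [pv_ldiff_or, pv_ldiff_and] at h
  omega

lemma pv_band_eq_land (a b : Int) : PySem.Int.band a b = Int.land a b := by
  unfold PySem.Int.band
  cases a with
  | ofNat m =>
    rw [if_pos (by exact Int.natCast_nonneg m)]
    cases b with
    | ofNat n =>
      rw [if_pos (by exact Int.natCast_nonneg n)]
      show _ = (↑(m &&& n) : Int)
      simp
    | negSucc n =>
      rw [if_neg (by omega)]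
      show _ = (↑(m.ldiff n) : Int)
      have he : (-(Int.negSucc n) - 1).toNat = n := by rw [Int.negSucc_eq]; omega
      rw [he]
      simp [pv_sub_and]
  | negSucc m =>
    rw [if_neg (by omega)]
    have hea : (-(Int.negSucc m) - 1).toNat = m := by rw [Int.negSucc_eq]; omega
    cases b with
    | ofNat n =>
      rw [if_pos (by exact Int.natCast_nonneg n)]
      show _ = (↑(n.ldiff m) : Int)
      rw [hea]
      simp [pv_sub_and]
    | negSucc n =>
      rw [if_neg (by omega)]
      have heb : (-(Int.negSucc n) - 1).toNat = n := by rw [Int.negSucc_eq]; omega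
      show _ = Int.negSucc (m ||| n)
      rw [hea, heb, Int.negSucc_eq]
      ring

lemma pv_bxor_eq_xor (a b : Int) : PySem.Int.bxor a b = Int.xor a b := by
  unfold PySem.Int.bxor
  cases a with
  | ofNat m =>
    rw [if_pos (by exact Int.natCast_nonneg m)]
    cases b with
    | ofNat n =>
      rw [if_pos (by exact Int.natCast_nonneg n)]
      show _ = (↑(m ^^^ n) : Int)
      simp
    | negSucc n =>
      rw [if_neg (by omega)]
      have he : (-(Int.negSucc n) - 1).toNat = n := by rw [Int.negSucc_eq]; omega
      show _ = Int.negSucc (m ^^^ n)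
      rw [he, show (Int.ofNat m).toNat = m from rfl, Int.negSucc_eq]
      ring
  | negSucc m =>
    rw [if_neg (by omega)]
    have hea : (-(Int.negSucc m) - 1).toNat = m := by rw [Int.negSucc_eq]; omega
    cases b with
    | ofNat n =>
      rw [if_pos (by exact Int.natCast_nonneg n)]
      show _ = Int.negSucc (m ^^^ n)
      rw [hea, show (Int.ofNat n).toNat = n from rfl, Int.negSucc_eq]
      ring
    | negSucc n =>
      rw [if_neg (by omega)]
      have heb : (-(Int.negSucc n) - 1).toNat = n := by rw [Int.negSucc_eq]; omega
      show _ = (↑(m ^^^ n) : Int)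
      rw [hea, heb]

lemma pv_testBit_band (a b : Int) (k : Nat) :
    (PySem.Int.band a b).testBit k = (a.testBit k && b.testBit k) := by
  rw [pv_band_eq_land]; exact Int.testBit_land a b k

lemma pv_testBit_bxor (a b : Int) (k : Nat) :
    (PySem.Int.bxor a b).testBit k = xor (a.testBit k) (b.testBit k) := by
  rw [pv_bxor_eq_xor]; exact Int.testBit_lxor a b k

lemma pv_eq_zero (a : Int) (h : ∀ k, a.testBit k = false) : a = 0 := by
  cases a with
  | ofNat m =>
    have hm : m = 0 := Nat.zero_of_testBit_eq_false (fun i => h i)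
    simp [hm]
  | negSucc m =>
    exfalso
    have hlt : m.testBit m = false := Nat.testBit_lt_two_pow (Nat.lt_two_pow_self)
    have := h m
    simp [Int.testBit, hlt] at this

-- a false bit of the accumulator survives a fold of band steps
lemma pv_foldl_pres {α : Type} (f : Int → α → Int) (l : List α) (k : Nat)
    (h : ∀ a x, a.testBit k = false → (f a x).testBit k = false) :
    ∀ ans : Int, ans.testBit k = false → (l.foldl f ans).testBit k = false := by
  induction l with
  | nil => intro ans hans; simpa using hans
  | cons x l ihl =>
    intro ans hans
    exact ihl (f ans x) (h ans x hans)

-- the double and-fold of A is 0 as soon as the three terms g 0 0, g 0 1, g 1 1 cover every bit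
lemma pv_fold2_zero (g : Int → Int → Int) (n : Int) (hn : 2 ≤ n)
    (hc : ∀ k, (g 0 0).testBit k = false ∨ (g 0 1).testBit k = false ∨ (g 1 1).testBit k = false) :
    ((PySem.List.pyRange 0 n 1).foldl
      (fun ans s => (PySem.List.pyRange s n 1).foldl (fun a e => PySem.Int.band a (g s e)) ans)
      (Int.not 0)) = 0 := by
  apply pv_eq_zero
  intro k
  have hband : ∀ (s : Int) (a x : Int), a.testBit k = false →
      (PySem.Int.band a (g s x)).testBit k = false := by
    intro s a x hx
    rw [pv_testBit_band, hx, Bool.false_and]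
  have hinner : ∀ (s : Int) (ans : Int), ans.testBit k = false →
      ((PySem.List.pyRange s n 1).foldl (fun a e => PySem.Int.band a (g s e)) ans).testBit k = false := by
    intro s
    exact pv_foldl_pres _ _ k (hband s)
  have houter := pv_foldl_pres
    (fun ans s => (PySem.List.pyRange s n 1).foldl (fun a e => PySem.Int.band a (g s e)) ans)
    (PySem.List.pyRange 2 n 1) k (fun a s ha => hinner s a ha)
  have h02 : PySem.List.pyRange 0 n 1 = 0 :: 1 :: PySem.List.pyRange 2 n 1 := by
    rw [PySem.List.pyRange_one_cons (by omega : (0:Int) < n),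
        PySem.List.pyRange_one_cons (by omega : (0:Int) + 1 < n)]
    norm_num
  have h12 : PySem.List.pyRange 1 n 1 = 1 :: PySem.List.pyRange 2 n 1 := by
    rw [PySem.List.pyRange_one_cons (by omega : (1:Int) < n)]
    norm_num
  rw [h02]
  simp only [List.foldl_cons]
  rcases hc k with h | h | h
  · -- g 0 0 kills bit k in the first band of the start = 0 inner loop
    apply houter
    apply hinner 1
    rw [h02]
    simp only [List.foldl_cons]
    apply pv_foldl_pres _ _ k (hband 0)
    rw [pv_testBit_band, pv_testBit_band, h]
    simp
  · -- g 0 1 kills bit k in the second band of the start = 0 inner loop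
    apply houter
    apply hinner 1
    rw [h02]
    simp only [List.foldl_cons]
    apply pv_foldl_pres _ _ k (hband 0)
    rw [pv_testBit_band, h, Bool.and_false]
  · -- g 1 1 kills bit k in the first band of the start = 1 inner loop
    apply houter
    rw [h12]
    simp only [List.foldl_cons]
    apply pv_foldl_pres _ _ k (hband 1)
    rw [pv_testBit_band, h, Bool.and_false]

-- the pre-xor construction only appends to its accumulator
lemma pv_build_append (f : List Int → Int → Int) :
    ∀ (l : List Int) (acc : List Int),
      ∃ t, l.foldl (fun a i => a ++ [f a i]) acc = acc ++ t := by
  intro l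
  induction l with
  | nil => intro acc; exact ⟨[], by simp⟩
  | cons i l ihl =>
    intro acc
    obtain ⟨t, ht⟩ := ihl (acc ++ [f acc i])
    exact ⟨f acc i :: t, by simpa using ht⟩

-- the first two entries of pre_xor_list are X[0] and X[0] ^ X[1]
lemma pv_preXor_head (x0 x1 : Int) (rest : List Int) :
    ∃ t, pvPreXor (x0 :: x1 :: rest) = x0 :: PySem.Int.bxor x0 x1 :: t := by
  unfold pvPreXor
  have hlen : ((x0 :: x1 :: rest).length : Int) = (rest.length : Int) + 2 := by
    simp; omega
  have hr : PySem.List.pyRange 1 ((x0 :: x1 :: rest).length : Int) 1 =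
      1 :: PySem.List.pyRange 2 ((x0 :: x1 :: rest).length : Int) 1 := by
    rw [PySem.List.pyRange_one_cons (by rw [hlen]; omega : (1:Int) < ((x0 :: x1 :: rest).length : Int))]
    norm_num
  rw [hr, PySem.List.pyGetD_zero_cons]
  simp only [List.foldl_cons]
  have hstep : [x0] ++ [PySem.Int.bxor (PySem.List.pyGetD [x0] (-1) 0)
      (PySem.List.pyGetD (x0 :: x1 :: rest) 1 0)] = [x0, PySem.Int.bxor x0 x1] := by
    have h1 : PySem.List.pyGetD [x0] (-1) 0 = x0 := by
      simp [PySem.List.pyGetD, PySem.List.pyGet?, PySem.List.pyIdx?]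
    have h2 : PySem.List.pyGetD (x0 :: x1 :: rest) 1 0 = x1 := by
      simp [PySem.List.pyGetD, PySem.List.pyGet?, PySem.List.pyIdx?]
    rw [h1, h2]
    rfl
  rw [hstep]
  obtain ⟨t, ht⟩ := pv_build_append
    (fun a i => PySem.Int.bxor (PySem.List.pyGetD a (-1) 0) (PySem.List.pyGetD (x0 :: x1 :: rest) i 0))
    (PySem.List.pyRange 2 ((x0 :: x1 :: rest).length : Int) 1) [x0, PySem.Int.bxor x0 x1]
  exact ⟨t, by simpa using ht⟩

-- length ≥ 2: A's double loop returns 0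
lemma pv_f_eff_long (x0 x1 : Int) (rest : List Int) :
    f_eff (x0 :: x1 :: rest) = 0 := by
  have hne : (x0 :: x1 :: rest) ≠ [] := by simp
  obtain ⟨t, hpre⟩ := pv_preXor_head x0 x1 rest
  set X := x0 :: x1 :: rest with hX
  set n : Int := (X.length : Int) with hn
  have h2n : 2 ≤ n := by simp [hn, hX]; omega
  set g : Int → Int → Int := fun s e =>
    if s = 0 then PySem.List.pyGetD (pvPreXor X) e 0
    else PySem.Int.bxor (PySem.List.pyGetD (pvPreXor X) e 0) (PySem.List.pyGetD X (s - 1) 0) with hg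
  have hbody : (fun (ans : Int) (start : Int) =>
      (PySem.List.pyRange start n 1).foldl
        (fun ans e =>
          if start = 0 then PySem.Int.band ans (PySem.List.pyGetD (pvPreXor X) e 0)
          else PySem.Int.band ans
            (PySem.Int.bxor (PySem.List.pyGetD (pvPreXor X) e 0) (PySem.List.pyGetD X (start - 1) 0)))
        ans)
      = (fun (ans : Int) (start : Int) =>
      (PySem.List.pyRange start n 1).foldl (fun a e => PySem.Int.band a (g start e)) ans) := by
    funext ans start
    congr 1
    funext a e
    by_cases h : start = 0 <;> simp [hg, h]
  have hg00 : g 0 0 = x0 := by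
    simp only [hg, reduceIte]
    rw [hpre, PySem.List.pyGetD_zero_cons]
  have hg01 : g 0 1 = PySem.Int.bxor x0 x1 := by
    simp only [hg, reduceIte]
    rw [hpre]
    simp [PySem.List.pyGetD, PySem.List.pyGet?, PySem.List.pyIdx?]
  have hg11 : g 1 1 = PySem.Int.bxor (PySem.Int.bxor x0 x1) x0 := by
    simp only [hg]
    rw [hpre]
    have e1 : PySem.List.pyGetD (x0 :: PySem.Int.bxor x0 x1 :: t) 1 0 = PySem.Int.bxor x0 x1 := by
      simp [PySem.List.pyGetD, PySem.List.pyGet?, PySem.List.pyIdx?]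
    have e2 : PySem.List.pyGetD X ((1 : Int) - 1) 0 = x0 := by
      rw [hX]
      norm_num [PySem.List.pyGetD_zero_cons]
    rw [e1, e2]
    norm_num
  have hc : ∀ k, (g 0 0).testBit k = false ∨ (g 0 1).testBit k = false ∨ (g 1 1).testBit k = false := by
    intro k
    rw [hg00, hg01, hg11, pv_testBit_bxor, pv_testBit_bxor, pv_testBit_bxor]
    cases x0.testBit k <;> cases x1.testBit k <;> simp
  show f_eff X = 0
  unfold f_eff
  rw [if_neg hne, ← hn, hbody]
  exact pv_fold2_zero g n h2n hc

lemma pv_f_eff_single (x : Int) : f_eff [x] = x := by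
  unfold f_eff
  rw [if_neg (by simp)]
  have h1 : PySem.List.pyRange 0 (([x].length : Int)) 1 = [0] := by
    simp [PySem.List.pyRange_one_cons, PySem.List.pyRange_one_eq_nil]
  rw [h1]
  simp only [List.foldl_cons, List.foldl_nil, reduceIte]
  rw [h1]
  simp only [List.foldl_cons, List.foldl_nil]
  have h3 : PySem.List.pyGetD (pvPreXor [x]) 0 0 = x := by
    unfold pvPreXor
    simp [PySem.List.pyRange_one_eq_nil, PySem.List.pyGetD, PySem.List.pyGet?, PySem.List.pyIdx?]
  rw [h3, show Int.not 0 = (-1 : Int) from rfl, PySem.Int.band_comm, PySem.Int.band_neg_one]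

-- ===== VERDICT (by name: the statement is the Claim_ definition above) =====
theorem f_eff_spec : Claim_equal_f_eff := by
  intro X _
  unfold Spec_f_eff
  match X with
  | [] => rfl
  | [x] =>
    rw [pv_f_eff_single]
    simp [f_eff_alt, PySem.List.pyGetD, PySem.List.pyGet?, PySem.List.pyIdx?]
  | x0 :: x1 :: rest =>
    rw [pv_f_eff_long]
    simp [f_eff_alt]
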